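-- pv_equiv track=rewrite | github.com/huguesrichard/AdventOfCode2023 | Puzzle-14.py | slide_line
-- ===== SOURCE A (Python) =====
-- def slide_line(l_chars: list[str]) -> list[str]:
--     """
--     list[str] -> list[str]
--     goes from left to right in a string and slides the
--     "0" characters to the left up to :
--         - the last "O"
--         - the last "#"
--     """
--     l_out = []
--     l_dots = []
--     for c in l_chars:
--         if c == "O":
--             l_out.append(c)
--         if c == ".":
--             l_dots.append(c)
--         if c == "#":
--             l_out = l_out + l_dots + [c]
--             l_dots = []
--     l_out = l_out + l_dots
--     return(l_out)
-- ===== SOURCE B (Python) =====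
-- def slide_line(l_chars: list[str]) -> list[str]:
--     # Split on '#', count 'O' and '.' per segment, rebuild with a single '#'
--     # between segments (simpler decomposition than A's dual-accumulator loop).
--     segs = [[]]
--     for c in l_chars:
--         if c == "#":
--             segs.append([])
--         else:
--             segs[-1].append(c)
--     built = [["O"] * seg.count("O") + ["."] * seg.count(".") for seg in segs]
--     out = built[0]
--     for seg in built[1:]:
--         out = out + ["#"] + seg
--     return out
-- ===== Notes on version B (the rewrite author's own statement) =====
-- stated objective: simpler
-- what changed: B splits the line on '#' into segments, counts 'O' and '.' per segment and rebuilds each segment by replication, joining with single '#'s, instead of A's single pass with two growing accumulator lists flushed at each '#'.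
import Mathlib
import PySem

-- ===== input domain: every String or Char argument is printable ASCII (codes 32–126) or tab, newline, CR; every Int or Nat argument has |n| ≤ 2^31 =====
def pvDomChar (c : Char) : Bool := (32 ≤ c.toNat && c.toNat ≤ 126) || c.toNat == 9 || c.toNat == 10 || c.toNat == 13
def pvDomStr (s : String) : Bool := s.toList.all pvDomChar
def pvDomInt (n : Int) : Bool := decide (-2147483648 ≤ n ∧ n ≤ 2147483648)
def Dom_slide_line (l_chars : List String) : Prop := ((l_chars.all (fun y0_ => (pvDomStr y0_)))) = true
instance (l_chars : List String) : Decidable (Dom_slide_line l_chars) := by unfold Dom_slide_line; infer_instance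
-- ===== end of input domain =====

-- B re-decomposes A's dual-accumulator pass as split-on-'#' / count / rebuild; objective: simpler.

-- ===== PORT A =====
-- one loop iteration of A: three independent ifs on c over the state (l_out, l_dots)
def stepA (st : List String × List String) (c : String) : List String × List String :=
  let st1 := if c = "O" then (st.1 ++ [c], st.2) else st
  let st2 := if c = "." then (st1.1, st1.2 ++ [c]) else st1
  if c = "#" then (st2.1 ++ st2.2 ++ [c], []) else st2

def slide_line (l_chars : List String) : List String :=
  let st := l_chars.foldl stepA ([], [])
  st.1 ++ st.2

-- ===== PORT B =====
-- Source B's splitting loop: segs[-1].append(c) / segs.append([])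
def stepB (st : List (List String) × List String) (c : String) :
    List (List String) × List String :=
  if c = "#" then (st.1 ++ [st.2], []) else (st.1, st.2 ++ [c])

-- ["O"] * seg.count("O") + ["."] * seg.count(".")
def buildSeg (seg : List String) : List String :=
  List.replicate (seg.count "O") "O" ++ List.replicate (seg.count ".") "."

def slide_line_alt (l_chars : List String) : List String :=
  let st := l_chars.foldl stepB ([], [])
  let built := (st.1 ++ [st.2]).map buildSeg
  match built with
  | [] => []
  | h :: t => t.foldl (fun out s => out ++ "#" :: s) h

-- ===== PRECONDITION & SPEC =====
def Spec_slide_line (l_chars : List String) (out : List String) : Prop := out = slide_line_alt l_chars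
instance (l_chars : List String) (out : List String) : Decidable (Spec_slide_line l_chars out) := by unfold Spec_slide_line; infer_instance

-- ===== CLAIM (what is proved, stated in full; the proofs are below) =====
def Claim_equal_slide_line : Prop := ∀ (l_chars : List String), Dom_slide_line l_chars → Spec_slide_line l_chars (slide_line l_chars)

-- ===== LEMMAS AND PROOFS =====

-- A's state, expressed as a function of B's state (completed segments `done`, current `cur`)
def astate (done : List (List String)) (cur : List String) : List String × List String :=
  ((done.map (fun s => buildSeg s ++ ["#"])).flatten ++ List.replicate (cur.count "O") "O",
   List.replicate (cur.count ".") ".")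

theorem stepA_astate (done : List (List String)) (cur : List String) (c : String) :
    stepA (astate done cur) c = astate (stepB (done, cur) c).1 (stepB (done, cur) c).2 := by
  by_cases hO : c = "O"
  · subst hO
    simp [stepA, stepB, astate, List.count_append, List.replicate_succ']
  · by_cases hD : c = "."
    · subst hD
      simp [stepA, stepB, astate, List.count_append, List.replicate_succ']
    · by_cases hH : c = "#"
      · subst hH
        simp [stepA, stepB, astate, buildSeg]
      · simp [stepA, stepB, astate, hO, hD, hH, List.count_append]

theorem foldl_astate (l : List String) (done : List (List String)) (cur : List String) :
    l.foldl stepA (astate done cur)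
      = astate (l.foldl stepB (done, cur)).1 (l.foldl stepB (done, cur)).2 := by
  induction l generalizing done cur with
  | nil => simp
  | cons c rest ih =>
    simp only [List.foldl_cons, stepA_astate]
    exact ih _ _

theorem foldl_sep (t : List (List String)) (a : List String) :
    t.foldl (fun out s => out ++ "#" :: s) a
      = a ++ (t.map (fun s => "#" :: s)).flatten := by
  induction t generalizing a with
  | nil => simp
  | cons h t ih => simp [ih, List.append_assoc]

theorem flatten_sep (ds : List (List String)) (cur : List String) :
    ((ds ++ [cur]).map (fun s => "#" :: buildSeg s)).flatten
      = ["#"] ++ (ds.map (fun s => buildSeg s ++ ["#"])).flatten ++ buildSeg cur := by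
  induction ds with
  | nil => simp
  | cons d ds ih =>
    simp only [List.cons_append, List.map_cons, List.flatten_cons, ih]
    simp

theorem alt_render (done : List (List String)) (cur : List String) :
    (match (done ++ [cur]).map buildSeg with
      | [] => ([] : List String)
      | h :: t => t.foldl (fun out s => out ++ "#" :: s) h)
      = (done.map (fun s => buildSeg s ++ ["#"])).flatten ++ buildSeg cur := by
  cases done with
  | nil => simp
  | cons d ds =>
    have : ((d :: ds ++ [cur]).map buildSeg) = buildSeg d :: (ds ++ [cur]).map buildSeg := by
      simp
    rw [this]
    simp only [foldl_sep]
    have : ((ds ++ [cur]).map buildSeg).map (fun s => "#" :: s)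
        = ((ds ++ [cur]).map (fun s => "#" :: buildSeg s)) := by
      simp [List.map_map]
    rw [this, flatten_sep]
    simp

-- ===== VERDICT (by name: the statement is the Claim_ definition above) =====
theorem slide_line_spec : Claim_equal_slide_line := by
  intro l _
  show slide_line l = slide_line_alt l
  have h0 : (([], []) : List String × List String) = astate [] [] := by
    simp [astate]
  rw [slide_line, slide_line_alt, h0, foldl_astate, alt_render]
  simp [astate, buildSeg]
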